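-- pv_equiv track=rewrite | github.com/manwar/perlweeklychallenge-club | challenge-160/roger-bell-west/python/ch-1.py | fim
-- ===== SOURCE A (Python) =====
-- def fim(n0):
--   words=["zero","one","two","three","four",
--          "five","six","seven","eight","nine"]
--   n=n0
--   p=[]
--   while True:
--     s = words[n] + " is "
--     if n==4:
--       s += "magic."
--       p.append(s)
--       break
--     else:
--       n = len(words[n])
--       s += words[n]
--       p.append(s)
--   return (", ".join(p)).capitalize()
-- ===== SOURCE B (Python) =====
-- def fim(n0):
--   words=["zero","one","two","three","four",
--          "five","six","seven","eight","nine"]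
--   # pass 1: build the numeric chain (ends implicitly at 4)
--   chain=[]
--   cur=n0
--   while cur!=4:
--     chain.append(cur)
--     cur=len(words[cur])
--   chain.append(4)
--   # pass 2: render segments from consecutive pairs, plus the terminal one
--   segs=[words[a]+" is "+words[b] for a,b in zip(chain,chain[1:])]
--   segs.append("four is magic.")
--   return ", ".join(segs).capitalize()
-- ===== Notes on version B (the rewrite author's own statement) =====
-- stated objective: alternative
-- what changed: B separates the computation into two passes: first build the numeric chain of values (each followed by the length of its word) as a list of ints, then render the string segments from consecutive pairs plus the terminal segment, instead of A's single while-True loop that interleaves the arithmetic with string building.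
import Mathlib
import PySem

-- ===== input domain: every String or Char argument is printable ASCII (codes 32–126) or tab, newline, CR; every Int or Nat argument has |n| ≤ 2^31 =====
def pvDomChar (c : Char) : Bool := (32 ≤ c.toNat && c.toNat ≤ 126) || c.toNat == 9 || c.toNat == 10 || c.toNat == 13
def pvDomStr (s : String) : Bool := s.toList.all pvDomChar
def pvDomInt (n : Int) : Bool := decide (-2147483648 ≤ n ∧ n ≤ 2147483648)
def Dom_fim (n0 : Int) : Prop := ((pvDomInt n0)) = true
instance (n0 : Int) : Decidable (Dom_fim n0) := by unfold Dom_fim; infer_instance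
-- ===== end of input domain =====

-- B is an alternative decomposition (same cost): build the numeric chain first, then render the
-- string segments from consecutive pairs, instead of A's single loop interleaving both.

-- str.capitalize() (exact on ASCII, the only characters occurring here)
def pyCapitalize (s : String) : String :=
  match s.toList with
  | [] => ""
  | c :: cs => String.ofList (PySem.Chars.upperChar c :: cs.map PySem.Chars.lowerChar)

-- ===== PORT A =====
def fimWordsA : List String :=
  ["zero","one","two","three","four","five","six","seven","eight","nine"]

-- the while-True loop of A; fuel makes it total (inside Pre_ it breaks within 4 iterations)
def fimLoopA (fuel : Nat) (n : Int) (p : List String) : List String :=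
  match fuel with
  | 0 => p
  | fuel + 1 =>
    let s := ((PySem.List.pyGet? fimWordsA n).getD "") ++ " is "
    if n == 4 then
      p ++ [s ++ "magic."]
    else
      let n' : Int := PySem.Str.len ((PySem.List.pyGet? fimWordsA n).getD "")
      let s' := s ++ ((PySem.List.pyGet? fimWordsA n').getD "")
      fimLoopA fuel n' (p ++ [s'])

def fim (n0 : Int) : String :=
  pyCapitalize (PySem.Str.join ", " (fimLoopA 10 n0 []))

-- ===== PORT B =====
def fimWordsB : List String :=
  ["zero","one","two","three","four","five","six","seven","eight","nine"]

-- pass 1: the numeric chain, ending at 4 (fuel for totality; ≤ 4 steps inside Pre_)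
def fimChain (fuel : Nat) (cur : Int) : List Int :=
  match fuel with
  | 0 => [4]
  | fuel + 1 =>
    if cur == 4 then [4]
    else cur :: fimChain fuel (PySem.Str.len ((PySem.List.pyGet? fimWordsB cur).getD ""))

def fim_alt (n0 : Int) : String :=
  let chain := fimChain 10 n0
  let segs :=
    (chain.zip chain.tail).map
      (fun ab => ((PySem.List.pyGet? fimWordsB ab.1).getD "") ++ " is "
                 ++ ((PySem.List.pyGet? fimWordsB ab.2).getD ""))
      ++ ["four is magic."]
  pyCapitalize (PySem.Str.join ", " segs)

-- ===== PRECONDITION & SPEC =====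
-- Pre_: exactly the n0 for which words[n0] exists (Python negative indexing included);
-- outside it A raises IndexError on the first access.
def Pre_fim (n0 : Int) : Prop := -10 ≤ n0 ∧ n0 ≤ 9
instance (n0 : Int) : Decidable (Pre_fim n0) := by unfold Pre_fim; infer_instance
def pvWitness_fim : Int := 7

def Spec_fim (n0 : Int) (out : String) : Prop := out = fim_alt n0
instance (n0 : Int) (out : String) : Decidable (Spec_fim n0 out) := by unfold Spec_fim; infer_instance

-- ===== CLAIM (what is proved, stated in full; the proofs are below) =====
def Claim_equal_fim : Prop := ∀ (n0 : Int), Dom_fim n0 → Pre_fim n0 → Spec_fim n0 (fim n0)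

-- ===== LEMMAS AND PROOFS =====

-- ===== VERDICT (by name: the statement is the Claim_ definition above) =====
set_option maxHeartbeats 1000000 in
theorem fim_spec : Claim_equal_fim := by
  intro n0 _ hpre
  obtain ⟨h1, h2⟩ := hpre
  unfold Spec_fim
  interval_cases n0 <;>
    simp [fim, fim_alt, fimLoopA, fimChain, fimWordsA, fimWordsB, PySem.List.pyGet?, PySem.List.pyIdx?]
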